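-- pv_equiv track=rewrite | github.com/holbizmetrics/prime-alphabet-finder | prime_encoder.py | sanskrit_number_word
-- ===== SOURCE A (Python) =====
-- def sanskrit_number_word(n: int) -> str:
--     """Convert number to Sanskrit words (transliterated)."""
--     if n == 0:
--         return "shunya"
--
--     ones = ["", "eka", "dvi", "tri", "chatur", "pancha", "shat", "sapta", "ashta", "nava",
--             "dasha", "ekadasha", "dvadasha", "trayodasha", "chaturdasha", "panchadasha",
--             "shodasha", "saptadasha", "ashtadasha", "navadasha"]
--     tens = ["", "", "vimshati", "trimshati", "chatvarimshat", "panchashat", "shashti", "saptati", "ashiti", "navati"]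
--
--     if n < 20:
--         return ones[n]
--     elif n < 100:
--         if n % 10 == 0:
--             return tens[n // 10]
--         return ones[n % 10] + " " + tens[n // 10]
--     elif n < 1000:
--         if n // 100 == 1:
--             prefix = "shatam"
--         else:
--             prefix = ones[n // 100] + " shatam"
--         return prefix + (" " + sanskrit_number_word(n % 100) if n % 100 else "")
--     elif n < 1000000:
--         if n // 1000 == 1:
--             prefix = "sahasram"
--         else:
--             prefix = sanskrit_number_word(n // 1000) + " sahasram"
--         return prefix + (" " + sanskrit_number_word(n % 1000) if n % 1000 else "")
--     return str(n)
-- ===== SOURCE B (Python) =====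
-- _ONES = ["", "eka", "dvi", "tri", "chatur", "pancha", "shat", "sapta", "ashta", "nava",
--          "dasha", "ekadasha", "dvadasha", "trayodasha", "chaturdasha", "panchadasha",
--          "shodasha", "saptadasha", "ashtadasha", "navadasha"]
-- _TENS = ["", "", "vimshati", "trimshati", "chatvarimshat", "panchashat", "shashti", "saptati", "ashiti", "navati"]
--
-- # words for 0..99, precomputed once (unit word comes first: 'eka vimshati')
-- _SUB100 = _ONES[:20] + [(_ONES[u] + " " + _TENS[t]) if u else _TENS[t]
--                         for t in range(2, 10) for u in range(10)]
--
--
-- def _group3(g: int) -> list: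
--     """Token list for a three-digit group 1 <= g <= 999."""
--     out = []
--     h, s = divmod(g, 100)
--     if h:
--         if h != 1:
--             out.append(_SUB100[h])
--         out.append("shatam")
--     if s:
--         out.append(_SUB100[s])
--     return out
--
--
-- def sanskrit_number_word(n: int) -> str:
--     """Convert number to Sanskrit words (transliterated)."""
--     if n == 0:
--         return "shunya"
--     if n < 0 or n >= 1000000:
--         return str(n)
--     tokens = []
--     for g, name in ((n // 1000, "sahasram"), (n % 1000, "")):
--         if g:
--             if not (g == 1 and name):
--                 tokens.extend(_group3(g))
--             if name:
--                 tokens.append(name)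
--     return " ".join(tokens)
-- ===== Notes on version B (the rewrite author's own statement) =====
-- stated objective: alternative
-- what changed: Replaces A's branch chain with magnitude recursion by a precomputed 0..99 word table plus a data-driven loop over (group, scale-name) pairs that collects tokens into a list and joins them once at the end.
-- intended difference: For -20 <= n <= -1, A returns the word at Python's negative wraparound index ones[20+n] (e.g. 'navadasha' for -1), an accident of negative indexing; B returns str(n), the intended out-of-range fallback. — e.g. on sanskrit_number_word(-1): A returns "navadasha", B returns "-1"
import Mathlib
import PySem

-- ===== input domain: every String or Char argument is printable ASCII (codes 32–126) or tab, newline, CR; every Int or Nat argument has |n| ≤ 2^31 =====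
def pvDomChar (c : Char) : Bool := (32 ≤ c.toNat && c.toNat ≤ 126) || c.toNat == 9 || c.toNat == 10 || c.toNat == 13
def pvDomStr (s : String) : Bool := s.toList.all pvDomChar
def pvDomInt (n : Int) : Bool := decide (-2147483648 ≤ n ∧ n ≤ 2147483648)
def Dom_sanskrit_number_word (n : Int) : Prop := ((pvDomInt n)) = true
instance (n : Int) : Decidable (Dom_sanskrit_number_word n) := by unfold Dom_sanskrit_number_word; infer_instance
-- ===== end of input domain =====

-- B replaces A's branch chain with magnitude recursion by a precomputed 0..99 word table plus
-- a data-driven token loop over (group, scale-name) pairs joined once at the end (objective: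
-- alternative); on -20..-1, where A's value is a negative-index wraparound accident, B returns
-- str(n) (see D_ below).

-- ===== PORT A =====
def pyOnes : List String := ["", "eka", "dvi", "tri", "chatur", "pancha", "shat", "sapta", "ashta", "nava",
  "dasha", "ekadasha", "dvadasha", "trayodasha", "chaturdasha", "panchadasha",
  "shodasha", "saptadasha", "ashtadasha", "navadasha"]
def pyTens : List String := ["", "", "vimshati", "trimshati", "chatvarimshat", "panchashat", "shashti", "saptati", "ashiti", "navati"]

-- A's recursion has depth ≤ 3 (n → n//1000 → (n//1000)%100); fuel 4 is never exhausted on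
-- the inputs admitted by Pre_. `.getD ""` stands where Python would raise IndexError (n < -20),
-- excluded by Pre_.
def sanskritFuel : Nat → Int → String
  | 0, _ => ""
  | fuel+1, n =>
    if n = 0 then "shunya"
    else if n < 20 then (PySem.List.pyGet? pyOnes n).getD ""
    else if n < 100 then
      if PySem.Int.mod n 10 = 0 then (PySem.List.pyGet? pyTens (PySem.Int.floordiv n 10)).getD ""
      else (PySem.List.pyGet? pyOnes (PySem.Int.mod n 10)).getD "" ++ " " ++ (PySem.List.pyGet? pyTens (PySem.Int.floordiv n 10)).getD ""
    else if n < 1000 then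
      let pfx := if PySem.Int.floordiv n 100 = 1 then "shatam"
        else (PySem.List.pyGet? pyOnes (PySem.Int.floordiv n 100)).getD "" ++ " shatam"
      pfx ++ (if PySem.Int.mod n 100 ≠ 0 then " " ++ sanskritFuel fuel (PySem.Int.mod n 100) else "")
    else if n < 1000000 then
      let pfx := if PySem.Int.floordiv n 1000 = 1 then "sahasram"
        else sanskritFuel fuel (PySem.Int.floordiv n 1000) ++ " sahasram"
      pfx ++ (if PySem.Int.mod n 1000 ≠ 0 then " " ++ sanskritFuel fuel (PySem.Int.mod n 1000) else "")
    else PySem.Int.toStr n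

def sanskrit_number_word (n : Int) : String := sanskritFuel 4 n

-- ===== PORT B =====
def altOnes : List String := ["", "eka", "dvi", "tri", "chatur", "pancha", "shat", "sapta", "ashta", "nava",
  "dasha", "ekadasha", "dvadasha", "trayodasha", "chaturdasha", "panchadasha",
  "shodasha", "saptadasha", "ashtadasha", "navadasha"]
def altTens : List String := ["", "", "vimshati", "trimshati", "chatvarimshat", "panchashat", "shashti", "saptati", "ashiti", "navati"]

-- words for 0..99, precomputed once (the comprehension of Source B)
def sub100 : List String :=
  altOnes.take 20 ++ (PySem.List.pyRange 2 10 1).flatMap (fun t =>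
    (PySem.List.pyRange 0 10 1).map (fun u =>
      if u ≠ 0 then PySem.List.pyGetD altOnes u "" ++ " " ++ PySem.List.pyGetD altTens t ""
      else PySem.List.pyGetD altTens t ""))

-- token list for a three-digit group 1 <= g <= 999
def group3 (g : Int) : List String :=
  let h := PySem.Int.floordiv g 100
  let s := PySem.Int.mod g 100
  (if h ≠ 0 then (if h ≠ 1 then [PySem.List.pyGetD sub100 h ""] else []) ++ ["shatam"] else []) ++
  (if s ≠ 0 then [PySem.List.pyGetD sub100 s ""] else [])

def sanskrit_number_word_alt (n : Int) : String :=
  if n = 0 then "shunya"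
  else if n < 0 ∨ 1000000 ≤ n then PySem.Int.toStr n
  else
    let tokens := ([(PySem.Int.floordiv n 1000, "sahasram"), (PySem.Int.mod n 1000, "")] : List (Int × String)).foldl
      (fun acc p =>
        if p.1 ≠ 0 then
          (if ¬ (p.1 = 1 ∧ p.2 ≠ "") then acc ++ group3 p.1 else acc) ++
          (if p.2 ≠ "" then [p.2] else [])
        else acc) []
    PySem.Str.join " " tokens

-- ===== PRECONDITION & SPEC =====
-- Pre_ excludes n < -20, on which A raises IndexError (ones[n] past the negative-index range).
def Pre_sanskrit_number_word (n : Int) : Prop := -20 ≤ n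
instance (n : Int) : Decidable (Pre_sanskrit_number_word n) := by unfold Pre_sanskrit_number_word; infer_instance
def pvWitness_sanskrit_number_word : Int := (1234)

-- On -20 ≤ n ≤ -1 A returns the word at Python's wraparound index ones[20+n] (e.g. 'navadasha'
-- for -1), an accident of negative indexing; B returns str(n), the intended out-of-range fallback.
def D_sanskrit_number_word (n : Int) : Prop := -20 ≤ n ∧ n ≤ -1
instance (n : Int) : Decidable (D_sanskrit_number_word n) := by unfold D_sanskrit_number_word; infer_instance

def Spec_sanskrit_number_word (n : Int) (out : String) : Prop := ¬ D_sanskrit_number_word n → out = sanskrit_number_word_alt n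
instance (n : Int) (out : String) : Decidable (Spec_sanskrit_number_word n out) := by unfold Spec_sanskrit_number_word; infer_instance

def pvDiffWitness_sanskrit_number_word : Int := (-1)
def pvDiffWitnessOut_sanskrit_number_word : String × String := ("navadasha", "-1")

-- ===== CLAIM (what is proved, stated in full; the proofs are below) =====
def Claim_unchanged_sanskrit_number_word : Prop := ∀ (n : Int), Dom_sanskrit_number_word n → Pre_sanskrit_number_word n → Spec_sanskrit_number_word n (sanskrit_number_word n)
def Claim_changed_sanskrit_number_word : Prop := Dom_sanskrit_number_word (pvDiffWitness_sanskrit_number_word) ∧ Pre_sanskrit_number_word (pvDiffWitness_sanskrit_number_word) ∧ D_sanskrit_number_word (pvDiffWitness_sanskrit_number_word) ∧ sanskrit_number_word (pvDiffWitness_sanskrit_number_word) = pvDiffWitnessOut_sanskrit_number_word.1 ∧ sanskrit_number_word_alt (pvDiffWitness_sanskrit_number_word) = pvDiffWitnessOut_sanskrit_number_word.2 ∧ pvDiffWitnessOut_sanskrit_number_word.1 ≠ pvDiffWitnessOut_sanskrit_number_word.2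
def Claim_exact_sanskrit_number_word : Prop := ∀ (n : Int), Dom_sanskrit_number_word n → Pre_sanskrit_number_word n → D_sanskrit_number_word n → sanskrit_number_word n ≠ sanskrit_number_word_alt n

-- ===== LEMMAS AND PROOFS =====
set_option maxRecDepth 100000

-- joining a split token list (both halves nonempty)
lemma chars_join_append (sep : List Char) (A B : List (List Char)) (hA : A ≠ []) (hB : B ≠ []) :
    PySem.Chars.join sep (A ++ B) = PySem.Chars.join sep A ++ sep ++ PySem.Chars.join sep B := by
  induction A with
  | nil => exact absurd rfl hA
  | cons a A' ih =>
    cases A' with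
    | nil =>
      cases B with
      | nil => exact absurd rfl hB
      | cons b B' =>
        simp only [List.singleton_append, PySem.Chars.join_cons_cons, PySem.Chars.join_singleton]
    | cons a' A'' =>
      have e : (a' :: A'') ++ B = a' :: (A'' ++ B) := rfl
      rw [List.cons_append, e, PySem.Chars.join_cons_cons, ← e, ih (by simp),
          PySem.Chars.join_cons_cons sep a a' A'']
      simp [List.append_assoc]

lemma join_append (xs ys : List String) (hx : xs ≠ []) (hy : ys ≠ []) :
    PySem.Str.join " " (xs ++ ys) = PySem.Str.join " " xs ++ " " ++ PySem.Str.join " " ys := by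
  apply String.toList_inj.mp
  simp only [String.toList_append, PySem.Str.toList_join, List.map_append]
  exact chars_join_append _ _ _ (by simpa using hx) (by simpa using hy)

set_option maxHeartbeats 8000000 in
-- for 1 ≤ m < 1000 the joined group tokens are A's word (fuel 3 suffices below 1000)
lemma join_group3_nat : ∀ m : Nat, m < 1000 →
    ((m : Int) = 0) ∨ (PySem.Str.join " " (group3 (m : Int)) = sanskritFuel 3 (m : Int)
      ∧ group3 (m : Int) ≠ [] ∧ sanskritFuel 4 (m : Int) = sanskritFuel 3 (m : Int)) := by
  decide

lemma join_group3 (x : Int) (h1 : 1 ≤ x) (h2 : x < 1000) :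
    PySem.Str.join " " (group3 x) = sanskritFuel 3 x ∧ group3 x ≠ []
      ∧ sanskritFuel 4 x = sanskritFuel 3 x := by
  have hx : x = ((x.toNat : Nat) : Int) := by omega
  rw [hx]
  rcases join_group3_nat x.toNat (by omega) with h | h
  · omega
  · exact h

theorem sanskrit_number_word_spec : Claim_unchanged_sanskrit_number_word := by
  intro n _hdom hpre hnd
  have hn0 : 0 ≤ n := by
    unfold Pre_sanskrit_number_word at hpre
    unfold D_sanskrit_number_word at hnd
    omega
  by_cases h0 : n = 0
  · subst h0; rfl
  · by_cases hbig : 1000000 ≤ n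
    · unfold sanskrit_number_word sanskritFuel sanskrit_number_word_alt
      rw [if_neg h0, if_neg (by omega), if_neg (by omega), if_neg (by omega), if_neg (by omega),
          if_neg h0, if_pos (by omega)]
    · by_cases hsm : n < 1000
      · -- 1 <= n < 1000 : tokens reduce to group3 n
        have hq0 : PySem.Int.floordiv n 1000 = 0 := by
          rw [PySem.Int.floordiv_eq_ediv_of_pos (by omega)]; omega
        have hr : PySem.Int.mod n 1000 = n := by
          rw [PySem.Int.mod_eq_emod_of_pos (by omega)]; omega
        obtain ⟨jn, _, f4⟩ := join_group3 n (by omega) hsm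
        show sanskrit_number_word n = _
        unfold sanskrit_number_word_alt
        rw [if_neg h0, if_neg (by omega)]
        simp only [List.foldl, hq0, hr]
        rw [if_neg (show ¬((0:Int) ≠ 0) by omega), if_pos (show n ≠ 0 from h0)]
        rw [if_pos (show ¬(n = 1 ∧ ("":String) ≠ "") by simp)]
        rw [if_neg (show ¬(("":String) ≠ "") by simp)]
        simp only [List.nil_append, List.append_nil]
        show sanskritFuel 4 n = _
        rw [f4, ← jn]
      · -- 1000 <= n < 10^6
        have hq1 : 1 ≤ PySem.Int.floordiv n 1000 := by
          rw [PySem.Int.floordiv_eq_ediv_of_pos (by omega)]; omega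
        have hq2 : PySem.Int.floordiv n 1000 < 1000 := by
          rw [PySem.Int.floordiv_eq_ediv_of_pos (by omega)]; omega
        have hr1 : 0 ≤ PySem.Int.mod n 1000 := by
          rw [PySem.Int.mod_eq_emod_of_pos (by omega)]; omega
        have hr2 : PySem.Int.mod n 1000 < 1000 := by
          rw [PySem.Int.mod_eq_emod_of_pos (by omega)]; omega
        set q := PySem.Int.floordiv n 1000 with hq
        set r := PySem.Int.mod n 1000 with hrdef
        obtain ⟨jq, gq_ne, f4q⟩ := join_group3 q hq1 hq2
        show sanskrit_number_word n = _
        unfold sanskrit_number_word sanskritFuel sanskrit_number_word_alt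
        rw [if_neg h0, if_neg (show ¬ n < 20 by omega), if_neg (show ¬ n < 100 by omega),
            if_neg (show ¬ n < 1000 by omega), if_pos (show n < 1000000 by omega),
            if_neg h0, if_neg (show ¬ (n < 0 ∨ 1000000 ≤ n) by omega)]
        simp only [List.foldl, ← hq, ← hrdef]
        rw [if_pos (show q ≠ 0 by omega)]
        rw [if_pos (show ("sahasram":String) ≠ "" by simp)]
        by_cases hq1' : q = 1
        · rw [if_pos hq1', if_neg (show ¬¬(q = 1 ∧ ("sahasram":String) ≠ "") by simp [hq1'])]
          by_cases hr0 : r = 0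
          · rw [if_neg (show ¬ r ≠ 0 by omega), if_neg (show ¬ r ≠ 0 by omega)]
            decide
          · obtain ⟨jr, gr_ne, _⟩ := join_group3 r (by omega) hr2
            rw [if_pos (show r ≠ 0 from hr0), if_pos (show r ≠ 0 from hr0)]
            rw [if_pos (show ¬(r = 1 ∧ ("":String) ≠ "") by simp), if_neg (show ¬(("":String) ≠ "") by simp)]
            simp only [List.nil_append, List.append_nil]
            rw [join_append ["sahasram"] (group3 r) (by simp) gr_ne, jr]
            show "sahasram" ++ (" " ++ sanskritFuel 3 r) = _
            rw [← String.append_assoc]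
            rfl
        · rw [if_neg hq1', if_pos (show ¬(q = 1 ∧ ("sahasram":String) ≠ "") by simp [hq1'])]
          have jqs : PySem.Str.join " " ((([]:List String) ++ group3 q) ++ ["sahasram"]) = sanskritFuel 3 q ++ " sahasram" := by
            rw [List.nil_append, join_append (group3 q) ["sahasram"] gq_ne (by simp), jq]
            rw [String.append_assoc]
            rfl
          by_cases hr0 : r = 0
          · rw [if_neg (show ¬ r ≠ 0 by omega), if_neg (show ¬ r ≠ 0 by omega)]
            rw [jqs]
            simp
          · obtain ⟨jr, gr_ne, _⟩ := join_group3 r (by omega) hr2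
            rw [if_pos (show r ≠ 0 from hr0), if_pos (show r ≠ 0 from hr0)]
            rw [if_pos (show ¬(r = 1 ∧ ("":String) ≠ "") by simp), if_neg (show ¬(("":String) ≠ "") by simp)]
            simp only [List.append_nil]
            rw [join_append ((([]:List String) ++ group3 q) ++ ["sahasram"]) (group3 r) (by simp [gq_ne]) gr_ne, jqs, jr]
            apply String.toList_inj.mp
            simp [String.toList_append]


theorem sanskrit_number_word_changed : Claim_changed_sanskrit_number_word := by
  unfold Claim_changed_sanskrit_number_word; decide

theorem sanskrit_number_word_tight : Claim_exact_sanskrit_number_word := by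
  intro n _hdom _hpre hd
  unfold D_sanskrit_number_word at hd
  obtain ⟨h1, h2⟩ := hd
  interval_cases n <;> decide
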